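-- pv_equiv track=rewrite | github.com/jpsamuelson/aurora-icepower-booster | scripts/refill_zones.py | extract_filled_polygons
-- ===== SOURCE A (Python) =====
-- def extract_balanced(lines, start):
--     depth = 0
--     block = []
--     j = start
--     while j < len(lines):
--         block.append(lines[j])
--         for ch in lines[j]:
--             if ch == '(': depth += 1
--             elif ch == ')': depth -= 1
--         if depth <= 0:
--             return block, j
--         j += 1
--     return block, j
--
-- def extract_filled_polygons(zone_lines):
--     fills = []
--     i = 0
--     while i < len(zone_lines):
--         if zone_lines[i].strip().startswith('(filled_polygon'):
--             block, end_j = extract_balanced(zone_lines, i)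
--             fills.append(block)
--             i = end_j + 1
--             continue
--         i += 1
--     return fills
-- ===== SOURCE B (Python) =====
-- def extract_filled_polygons(zone_lines):
--     fills = []
--     in_block = False
--     depth = 0
--     current = []
--     for line in zone_lines:
--         if not in_block:
--             if not line.strip().startswith('(filled_polygon'):
--                 continue
--             in_block = True
--             depth = 0
--             current = []
--         current.append(line)
--         for ch in line:
--             depth += (ch == '(') - (ch == ')')
--         if depth <= 0:
--             fills.append(current)
--             in_block = False
--     if in_block:
--         fills.append(current)
--     return fills
-- ===== Notes on version B (the rewrite author's own statement) =====
-- stated objective: idiomatic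
-- what changed: Replaced the index-driven while loop that calls an extract_balanced helper (restarting a scan at each block start and patching the index with end_j+1) by a single for-loop state machine over the lines carrying in_block/depth/current, with one flush of an unterminated block at EOF.
import Mathlib
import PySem

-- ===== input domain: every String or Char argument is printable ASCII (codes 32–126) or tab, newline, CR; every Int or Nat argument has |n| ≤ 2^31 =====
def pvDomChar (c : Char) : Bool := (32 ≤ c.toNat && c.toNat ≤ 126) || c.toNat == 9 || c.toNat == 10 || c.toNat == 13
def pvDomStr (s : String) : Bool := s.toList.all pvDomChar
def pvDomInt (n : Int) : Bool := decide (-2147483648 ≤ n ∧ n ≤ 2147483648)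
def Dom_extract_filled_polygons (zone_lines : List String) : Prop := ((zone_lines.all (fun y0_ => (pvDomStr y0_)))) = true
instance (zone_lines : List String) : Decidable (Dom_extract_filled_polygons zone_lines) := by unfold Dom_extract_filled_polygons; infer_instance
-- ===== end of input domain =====

-- B replaces the index loop + extract_balanced helper by a single-pass state machine
-- (in_block / depth / current) over the lines; same values returned, no speed claim.

-- ===== PORT A =====

-- extract_balanced's inner 'for ch in lines[j]' depth update
def pvDeltaA (depth : Int) (cs : List Char) : Int :=
  cs.foldl (fun d ch => if ch = '(' then d + 1 else if ch = ')' then d - 1 else d) depth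

-- extract_balanced(lines, start), phrased on the suffix lines[start:]; returns
-- (block, lines after the terminating line) — A only ever resumes at end_j + 1.
def pvExtractBalanced : List String → Int → List String × List String
  | [], _ => ([], [])
  | l :: rest, depth =>
    let d := pvDeltaA depth l.toList
    if d ≤ 0 then ([l], rest)
    else
      let p := pvExtractBalanced rest d
      (l :: p.1, p.2)

theorem pvExtractBalanced_snd_le (lines : List String) (d : Int) :
    (pvExtractBalanced lines d).2.length ≤ lines.length - 1 := by
  induction lines generalizing d with
  | nil => simp [pvExtractBalanced]
  | cons l rest ih =>
    simp only [pvExtractBalanced]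
    split
    · simp
    · have := ih (pvDeltaA d l.toList)
      simp only [List.length_cons]
      omega

def extract_filled_polygons : List String → List (List String)
  | [] => []
  | l :: rest =>
    if PySem.Str.startswith (PySem.Str.strip l) "(filled_polygon" then
      let p := pvExtractBalanced (l :: rest) 0
      p.1 :: extract_filled_polygons p.2
    else
      extract_filled_polygons rest
  termination_by lines => lines.length
  decreasing_by
  · have := pvExtractBalanced_snd_le (l :: rest) 0
    simp only [List.length_cons] at *
    omega
  · simp

-- ===== PORT B =====

-- one step of B's for-loop; state = (fills, in_block, depth, current)
def pvStepB (st : List (List String) × Bool × Int × List String) (line : String) :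
    List (List String) × Bool × Int × List String :=
  match st with
  | (fills, inb, depth, cur) =>
    if inb = false ∧ PySem.Str.startswith (PySem.Str.strip line) "(filled_polygon" = false then
      (fills, inb, depth, cur)          -- 'continue'
    else
      let depth0 : Int := if inb then depth else 0
      let cur0 : List String := if inb then cur else []
      let cur1 := cur0 ++ [line]
      let d := line.toList.foldl
        (fun d ch => d + (if ch = '(' then (1 : Int) else 0) - (if ch = ')' then 1 else 0)) depth0
      if d ≤ 0 then (fills ++ [cur1], false, d, cur1)
      else (fills, true, d, cur1)

def extract_filled_polygons_alt (zone_lines : List String) : List (List String) :=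
  let st := zone_lines.foldl pvStepB ([], false, 0, [])
  if st.2.1 then st.1 ++ [st.2.2.2] else st.1

-- ===== PRECONDITION & SPEC =====
def Spec_extract_filled_polygons (zone_lines : List String) (out : List (List String)) : Prop := out = extract_filled_polygons_alt zone_lines
instance (zone_lines : List String) (out : List (List String)) : Decidable (Spec_extract_filled_polygons zone_lines out) := by unfold Spec_extract_filled_polygons; infer_instance

-- ===== CLAIM (what is proved, stated in full; the proofs are below) =====
def Claim_equal_extract_filled_polygons : Prop := ∀ (zone_lines : List String), Dom_extract_filled_polygons zone_lines → Spec_extract_filled_polygons zone_lines (extract_filled_polygons zone_lines)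

-- ===== LEMMAS AND PROOFS =====

-- B's per-character depth update computes the same value as A's
theorem pvDeltaB_eq (cs : List Char) (d : Int) :
    cs.foldl (fun d ch => d + (if ch = '(' then (1 : Int) else 0) - (if ch = ')' then 1 else 0)) d
      = pvDeltaA d cs := by
  induction cs generalizing d with
  | nil => simp [pvDeltaA]
  | cons c cs ih =>
    simp only [List.foldl_cons, pvDeltaA] at *
    rw [ih]
    congr 1
    by_cases h1 : c = '(' <;> by_cases h2 : c = ')' <;> simp [h1, h2] at *

def pvFinalize (st : List (List String) × Bool × Int × List String) : List (List String) :=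
  if st.2.1 then st.1 ++ [st.2.2.2] else st.1

-- joint loop invariant for B's fold, against A's two mutually-recursive phases:
-- out of a block the fold computes A's outer loop; inside a block (depth d,
-- accumulated current) it computes cur ++ the balanced block, then A's outer loop.
theorem pvB_invariant (n : Nat) : ∀ (lines : List String), lines.length ≤ n →
    (∀ (fs : List (List String)) (d0 : Int) (c0 : List String),
       pvFinalize (lines.foldl pvStepB (fs, false, d0, c0)) = fs ++ extract_filled_polygons lines)
    ∧ (∀ (fs : List (List String)) (d : Int) (cur : List String),
       pvFinalize (lines.foldl pvStepB (fs, true, d, cur))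
         = fs ++ [cur ++ (pvExtractBalanced lines d).1]
             ++ extract_filled_polygons (pvExtractBalanced lines d).2) := by
  induction n with
  | zero =>
    intro lines hlen
    have hnil : lines = [] := List.length_eq_zero_iff.mp (Nat.le_zero.mp hlen)
    subst hnil
    constructor
    · intro fs d0 c0; simp [pvFinalize, extract_filled_polygons]
    · intro fs d cur; simp [pvFinalize, pvExtractBalanced, extract_filled_polygons]
  | succ n ih =>
    intro lines hlen
    match lines with
    | [] =>
      constructor
      · intro fs d0 c0; simp [pvFinalize, extract_filled_polygons]
      · intro fs d cur; simp [pvFinalize, pvExtractBalanced, extract_filled_polygons]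
    | l :: rest =>
      have hrest : rest.length ≤ n := by simpa using Nat.lt_succ_iff.mp (by simpa using hlen)
      constructor
      · -- out of a block
        intro fs d0 c0
        by_cases hs : PySem.Str.startswith (PySem.Str.strip l) "(filled_polygon" = true
        · -- a block starts at l
          have hs2 : PySem.Chars.startswith (PySem.Chars.strip l.toList)
              ['(', 'f', 'i', 'l', 'l', 'e', 'd', '_', 'p', 'o', 'l', 'y', 'g', 'o', 'n'] = true := by simpa using hs
          by_cases hd : pvDeltaA 0 l.toList ≤ 0
          · -- single-line block
            have hstep : pvStepB (fs, false, d0, c0) l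
                = (fs ++ [[l]], false, pvDeltaA 0 l.toList, [l]) := by
              simp [pvStepB, hs2, pvDeltaB_eq, hd]
            rw [List.foldl_cons, hstep, (ih rest hrest).1]
            simp only [extract_filled_polygons]
            rw [if_pos hs]
            simp only [pvExtractBalanced]
            rw [if_pos hd]
            try simp [List.append_assoc]
          · -- multi-line block
            have hstep : pvStepB (fs, false, d0, c0) l
                = (fs, true, pvDeltaA 0 l.toList, [l]) := by
              simp [pvStepB, hs2, pvDeltaB_eq, hd]
            rw [List.foldl_cons, hstep, (ih rest hrest).2]
            simp only [extract_filled_polygons]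
            rw [if_pos hs]
            simp only [pvExtractBalanced]
            rw [if_neg hd]
            try simp [List.append_assoc]
        · -- no block: both skip l
          have hs2 : PySem.Chars.startswith (PySem.Chars.strip l.toList)
              ['(', 'f', 'i', 'l', 'l', 'e', 'd', '_', 'p', 'o', 'l', 'y', 'g', 'o', 'n'] = false := by simpa using hs
          have hstep : pvStepB (fs, false, d0, c0) l = (fs, false, d0, c0) := by
            simp [pvStepB, hs2]
          rw [List.foldl_cons, hstep, (ih rest hrest).1]
          simp only [extract_filled_polygons]
          rw [if_neg hs]
      · -- inside a block at depth d with accumulated current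
        intro fs d cur
        by_cases hd : pvDeltaA d l.toList ≤ 0
        · -- l closes the block
          have hstep : pvStepB (fs, true, d, cur) l
              = (fs ++ [cur ++ [l]], false, pvDeltaA d l.toList, cur ++ [l]) := by
            simp [pvStepB, pvDeltaB_eq, hd]
          rw [List.foldl_cons, hstep, (ih rest hrest).1]
          simp only [pvExtractBalanced]
          rw [if_pos hd]
          try simp [List.append_assoc]
        · -- block continues
          have hstep : pvStepB (fs, true, d, cur) l
              = (fs, true, pvDeltaA d l.toList, cur ++ [l]) := by
            simp [pvStepB, pvDeltaB_eq, hd]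
          rw [List.foldl_cons, hstep, (ih rest hrest).2]
          simp only [pvExtractBalanced]
          rw [if_neg hd]
          try simp [List.append_assoc]

-- ===== VERDICT (by name: the statement is the Claim_ definition above) =====
theorem extract_filled_polygons_spec : Claim_equal_extract_filled_polygons := by
  intro zone_lines _
  unfold Spec_extract_filled_polygons extract_filled_polygons_alt
  have h := (pvB_invariant zone_lines.length zone_lines le_rfl).1 [] 0 []
  simpa [pvFinalize] using h.symm
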